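-- pv_equiv track=rewrite | github.com/wdavidcalsin/python-exercises | count_sub_cadenas.py | cuenta_subcadenas_ax
-- ===== SOURCE A (Python) =====
-- def cuenta_subcadenas_ax(cadena):
--     As_hasta_i = 0
--     total_hasta_i = 0
--     for i in cadena:
--         if i == "A":
--             As_hasta_i += 1
--         if i == "X":
--             total_hasta_i += As_hasta_i
--     return total_hasta_i
-- ===== SOURCE B (Python) =====
-- def cuenta_subcadenas_ax(cadena):
--     return sum(cadena[:i].count("A") for i, c in enumerate(cadena) if c == "X")
-- ===== Notes on version B (the rewrite author's own statement) =====
-- stated objective: idiomatic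
-- what changed: Replaces the running accumulator pair with a one-line counting idiom: for each occurrence of the marker char, sum the count of the target char in the prefix before it, via enumerate and str.count.
import Mathlib
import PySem

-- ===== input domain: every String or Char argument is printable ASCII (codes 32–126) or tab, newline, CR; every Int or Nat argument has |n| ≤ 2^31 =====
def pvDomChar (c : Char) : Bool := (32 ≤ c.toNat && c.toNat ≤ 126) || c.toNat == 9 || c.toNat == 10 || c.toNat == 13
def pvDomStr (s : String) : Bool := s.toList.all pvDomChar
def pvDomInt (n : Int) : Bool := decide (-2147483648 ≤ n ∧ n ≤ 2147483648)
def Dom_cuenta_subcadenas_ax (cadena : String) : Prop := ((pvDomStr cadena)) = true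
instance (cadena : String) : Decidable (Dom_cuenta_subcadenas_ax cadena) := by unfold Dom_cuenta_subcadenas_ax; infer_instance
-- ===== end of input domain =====

-- B replaces A's running accumulator pair with the counting idiom: for each marker-char occurrence, count the target char in the prefix before it and sum (idiomatic, not faster).

-- ===== PORT A =====
-- running state (As_hasta_i, total_hasta_i); both 'if's applied in order, as in A
def cuenta_subcadenas_ax (cadena : String) : Int :=
  (cadena.toList.foldl
    (fun (st : Int × Int) i =>
      let st1 := if i == 'A' then (st.1 + 1, st.2) else st
      if i == 'X' then (st1.1, st1.2 + st1.1) else st1)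
    (0, 0)).2

-- ===== PORT B =====
-- sum(cadena[:i].count("A") for i, c in enumerate(cadena) if c == "X"):
-- generator-with-if = filter + map; cadena[:i] = Chars.slice; str.count = Chars.count
def cuenta_subcadenas_ax_alt (cadena : String) : Int :=
  ((((PySem.List.enumerate cadena.toList).filter (fun p => p.2 == 'X')).map
    (fun p => ((PySem.Chars.count (PySem.Chars.slice cadena.toList none (some p.1)) ['A'] : Nat) : Int))).sum)

-- ===== PRECONDITION & SPEC =====
def Spec_cuenta_subcadenas_ax (cadena : String) (out : Int) : Prop := out = cuenta_subcadenas_ax_alt cadena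
instance (cadena : String) (out : Int) : Decidable (Spec_cuenta_subcadenas_ax cadena out) := by unfold Spec_cuenta_subcadenas_ax; infer_instance

-- ===== CLAIM (what is proved, stated in full; the proofs are below) =====
def Claim_equal_cuenta_subcadenas_ax : Prop := ∀ (cadena : String), Dom_cuenta_subcadenas_ax cadena → Spec_cuenta_subcadenas_ax cadena (cuenta_subcadenas_ax cadena)

-- ===== LEMMAS AND PROOFS =====

-- Chars.count with a single-character needle is the per-character count
lemma charsCount_go_single (c : Char) :
    ∀ (fuel : Nat) (l : List Char) (acc : Nat),
      PySem.Chars.count.go [c] fuel l acc = acc + (l.take fuel).count c := by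
  intro fuel
  induction fuel with
  | zero => intro l acc; simp [PySem.Chars.count.go]
  | succ n ih =>
    intro l acc
    cases l with
    | nil => simp [PySem.Chars.count.go]
    | cons h t =>
      rw [PySem.Chars.count.go]
      by_cases hc : h = c
      · subst hc
        simp [List.isPrefixOf, ih]
        omega
      · have : List.isPrefixOf [c] (h :: t) = false := by
          simp [List.isPrefixOf]; exact fun e => hc e.symm
        simp [this, ih, hc]

lemma charsCount_single (c : Char) (l : List Char) :
    PySem.Chars.count l [c] = l.count c := by
  rw [PySem.Chars.count]
  simp [charsCount_go_single]

-- B reduced to a pure list form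
def bsum (cs : List Char) : Int :=
  (((PySem.List.enumerate cs).filter (fun p => p.2 == 'X')).map
    (fun p => ((cs.take p.1.toNat).count 'A' : Int))).sum

lemma alt_eq_bsum (cadena : String) : cuenta_subcadenas_ax_alt cadena = bsum cadena.toList := by
  unfold cuenta_subcadenas_ax_alt bsum
  congr 1
  apply List.map_congr_left
  intro p hp
  have hp' : p ∈ PySem.List.enumerate cadena.toList := List.mem_of_mem_filter hp
  rcases (PySem.List.mem_enumerate_iff _ _ _).1 hp' with ⟨k, hk, rfl⟩
  simp [PySem.Chars.slice_eq_listSlice, charsCount_single]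

lemma bsum_append (cs : List Char) (c : Char) :
    bsum (cs ++ [c]) = bsum cs + (if c == 'X' then (cs.count 'A' : Int) else 0) := by
  unfold bsum
  rw [PySem.List.enumerate_append]
  simp only [List.filter_append, List.map_append, List.sum_append]
  congr 1
  · congr 1
    apply List.map_congr_left
    intro p hp
    have hp' : p ∈ PySem.List.enumerate cs := List.mem_of_mem_filter hp
    rcases (PySem.List.mem_enumerate_iff _ _ _).1 hp' with ⟨k, hk, rfl⟩
    simp
    rw [List.take_append_of_le_length (by omega)]
  · simp [PySem.List.enumerate_cons, PySem.List.enumerate_nil]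
    by_cases hc : c = 'X' <;> simp [hc]

-- the fold of A, with both state components characterised
lemma foldA_characterised (cs : List Char) :
    cs.foldl
      (fun (st : Int × Int) i =>
        let st1 := if i == 'A' then (st.1 + 1, st.2) else st
        if i == 'X' then (st1.1, st1.2 + st1.1) else st1)
      (0, 0) = ((cs.count 'A' : Int), bsum cs) := by
  induction cs using List.reverseRecOn with
  | nil => simp [bsum, PySem.List.enumerate_nil]
  | append_singleton cs c ih =>
    rw [List.foldl_append, ih, bsum_append]
    simp only [List.foldl_cons, List.foldl_nil, List.count_append, List.count_singleton]
    by_cases hA : c = 'A'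
    · subst hA; simp
    · by_cases hX : c = 'X' <;> simp [hA, hX]

-- ===== VERDICT (by name: the statement is the Claim_ definition above) =====
theorem cuenta_subcadenas_ax_spec : Claim_equal_cuenta_subcadenas_ax := by
  intro cadena _
  unfold Spec_cuenta_subcadenas_ax cuenta_subcadenas_ax
  rw [alt_eq_bsum, foldA_characterised]
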